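-- pv_equiv track=rewrite | github.com/colorlessdia/Online-Judge | 프로그래머스/unrated/181904. 세로 읽기/세로 읽기.py | solution
-- ===== SOURCE A (Python) =====
-- def solution(my_string, m, c):
--     result = []
--     temp = ''
--
--     for i, s in enumerate(my_string, 1):
--         if i % m != 0:
--             temp += s
--         else:
--             temp += s
--             result.append(temp[c - 1])
--             temp = ''
--
--     return ''.join(result)
-- ===== SOURCE B (Python) =====
-- def solution(my_string, m, c):
--     n = len(my_string) // m
--     return my_string[c-1::m][:n]
-- ===== Notes on version B (the rewrite author's own statement) =====
-- stated objective: simpler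
-- what changed: Replaces the per-character loop with temp-string accumulation by arithmetic: n = len(my_string)//m complete rows, and column c is read off directly with the strided slice my_string[c-1::m] truncated to n.
-- outside the precondition, e.g. on solution('abcd', 2, 0): A returns 'bd', B returns 'd'; on solution('ab', -1, 1): A returns 'ab', B returns ''
import Mathlib
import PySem

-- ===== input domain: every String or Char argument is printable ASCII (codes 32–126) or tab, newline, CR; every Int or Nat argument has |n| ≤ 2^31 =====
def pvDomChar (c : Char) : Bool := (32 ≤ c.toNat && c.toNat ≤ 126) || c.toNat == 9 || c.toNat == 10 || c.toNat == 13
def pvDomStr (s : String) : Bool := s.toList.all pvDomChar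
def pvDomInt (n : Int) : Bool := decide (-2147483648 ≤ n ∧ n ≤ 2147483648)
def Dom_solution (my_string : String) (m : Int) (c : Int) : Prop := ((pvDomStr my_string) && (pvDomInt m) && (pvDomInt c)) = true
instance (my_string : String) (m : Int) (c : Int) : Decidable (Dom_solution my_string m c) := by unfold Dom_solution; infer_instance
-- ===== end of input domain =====

-- B reads column c directly with a strided slice my_string[c-1::m] truncated to the number of
-- complete rows, instead of A's per-character loop accumulating each row (simpler).

-- ===== PORT A =====
-- loop body of A's 'for i, s in enumerate(my_string, 1)'; state = (result, temp).
-- pyGetD's default ' ' is only reached where Python's temp[c-1] raises IndexError (outside Pre_).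
def stepA (m c : Int) (acc : List Char × List Char) (p : Int × Char) : List Char × List Char :=
  if PySem.Int.mod p.1 m ≠ 0 then (acc.1, acc.2 ++ [p.2])
  else (acc.1 ++ [PySem.List.pyGetD (acc.2 ++ [p.2]) (c - 1) ' '], [])

def solution (my_string : String) (m : Int) (c : Int) : String :=
  String.ofList ((PySem.List.enumerate my_string.toList 1).foldl (stepA m c) ([], [])).1

-- ===== PORT B =====
-- Source B: n = len(my_string) // m; return my_string[c-1::m][:n]
-- slice? is none only for step m = 0, where Python raises ValueError (outside Pre_): .getD [] there.
def solution_alt (my_string : String) (m : Int) (c : Int) : String :=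
  -- n = len(my_string) // m; my_string[c-1::m][:n]
  String.ofList (PySem.List.slice
    ((PySem.List.slice? my_string.toList (some (c - 1)) none m).getD []) none
    (some (PySem.Int.floordiv (PySem.Str.len my_string) m)))

-- ===== PRECONDITION & SPEC =====
-- Pre_ is the problem's natural domain: m ≥ 1 row width and a valid column 1 ≤ c ≤ m (any c is
-- admitted when the string is shorter than m, since then no row completes and no indexing happens).
-- Outside it A raises IndexError/ZeroDivisionError, or returns accidental values via Python's
-- negative-index wraparound (c ≤ 0) or negative-modulus row splitting (m < 0).
def Pre_solution (my_string : String) (m : Int) (c : Int) : Prop :=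
  1 ≤ m ∧ ((1 ≤ c ∧ c ≤ m) ∨ PySem.Str.len my_string < m)
instance (my_string : String) (m : Int) (c : Int) : Decidable (Pre_solution my_string m c) := by
  unfold Pre_solution; infer_instance
def pvWitness_solution : String × Int × Int := ("ihrhbseevf", 2, 2)

def Spec_solution (my_string : String) (m : Int) (c : Int) (out : String) : Prop := out = solution_alt my_string m c
instance (my_string : String) (m : Int) (c : Int) (out : String) : Decidable (Spec_solution my_string m c out) := by unfold Spec_solution; infer_instance

-- ===== CLAIM (what is proved, stated in full; the proofs are below) =====
def Claim_equal_solution : Prop := ∀ (my_string : String) (m : Int) (c : Int), Dom_solution my_string m c → Pre_solution my_string m c → Spec_solution my_string m c (solution my_string m c)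

-- ===== LEMMAS AND PROOFS =====

-- the column as a closed form: one char per complete row, row k's char at index k*M + C
def colChars (M C : Nat) (ls : List Char) : List Char :=
  (List.range (ls.length / M)).map (fun k => ls.getD (k * M + C) ' ')

-- A's loop over a stretch whose indices are never divisible by m just appends to temp
lemma runA_no_complete (m c : Int) : ∀ (u res temp : List Char) (s : Int),
    (∀ k : Nat, k < u.length → PySem.Int.mod (s + k) m ≠ 0) →
    List.foldl (stepA m c) (res, temp) (PySem.List.enumerate u s) = (res, temp ++ u) := by
  intro u
  induction u with
  | nil => intro res temp s h; simp [PySem.List.enumerate_nil]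
  | cons x u ih =>
    intro res temp s h
    rw [PySem.List.enumerate_cons, List.foldl_cons]
    have h0 : PySem.Int.mod s m ≠ 0 := by
      have := h 0 (by simp); simpa using this
    rw [show stepA m c (res, temp) (s, x) = (res, temp ++ [x]) by simp [stepA, h0]]
    rw [ih res (temp ++ [x]) (s + 1) ?_]
    · simp
    · intro k hk
      have := h (k + 1) (by simpa using hk)
      have e : s + ((k:Int) + 1) = s + 1 + k := by ring
      simpa [e] using this

-- A's loop over one complete row (only the last index divisible by m) emits one column char
lemma runA_chunk (m c : Int) : ∀ (u : List Char), u ≠ [] → ∀ (res temp : List Char) (s : Int),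
    (∀ k : Nat, k + 1 < u.length → PySem.Int.mod (s + k) m ≠ 0) →
    PySem.Int.mod (s + ((u.length - 1 : Nat) : Int)) m = 0 →
    List.foldl (stepA m c) (res, temp) (PySem.List.enumerate u s)
      = (res ++ [PySem.List.pyGetD (temp ++ u) (c - 1) ' '], []) := by
  intro u
  induction u with
  | nil => intro h; exact absurd rfl h
  | cons x u ih =>
    intro _ res temp s h hlast
    rw [PySem.List.enumerate_cons, List.foldl_cons]
    rcases List.eq_nil_or_concat' u with h0 | ⟨u', y, rfl⟩
    · subst h0
      have hz : PySem.Int.mod s m = 0 := by simpa using hlast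
      rw [show stepA m c (res, temp) (s, x)
            = (res ++ [PySem.List.pyGetD (temp ++ [x]) (c - 1) ' '], []) by simp [stepA, hz]]
      simp [PySem.List.enumerate_nil]
    · have hne : u' ++ [y] ≠ [] := by simp
      have h0 : PySem.Int.mod s m ≠ 0 := by
        have := h 0 (by simp); simpa using this
      rw [show stepA m c (res, temp) (s, x) = (res, temp ++ [x]) by simp [stepA, h0]]
      rw [ih hne res (temp ++ [x]) (s + 1) ?_ ?_]
      · simp
      · intro k hk
        have := h (k + 1) (by simp at hk ⊢; omega)
        have e : s + ((k:Int) + 1) = s + 1 + k := by ring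
        simpa [e] using this
      · have hL : (x :: (u' ++ [y])).length - 1 = (u' ++ [y]).length - 1 + 1 := by simp
        have e : s + 1 + (((u' ++ [y]).length - 1 : Nat) : Int)
            = s + (((x :: (u' ++ [y])).length - 1 : Nat) : Int) := by
          simp; omega
        rw [e]; exact hlast

-- A's whole loop computes colChars, row by row
lemma runA_outer (m c : Int) (hm : 0 < m) (hc1 : 1 ≤ c) (hc2 : c ≤ m) :
    ∀ (N : Nat) (ls : List Char), ls.length ≤ N → ∀ (a : Nat) (res : List Char),
    (List.foldl (stepA m c) (res, []) (PySem.List.enumerate ls ((a : Int) * m + 1))).1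
      = res ++ colChars m.toNat (c - 1).toNat ls := by
  intro N
  induction N with
  | zero =>
    intro ls hlen a res
    have : ls = [] := List.eq_nil_of_length_eq_zero (by omega)
    subst this
    simp [PySem.List.enumerate_nil, colChars]
  | succ N ih =>
    intro ls hlen a res
    set M := m.toNat with hMdef
    have hM1 : 1 ≤ M := by omega
    have hMm : (M : Int) = m := by omega
    by_cases hsmall : ls.length < M
    · rw [runA_no_complete m c ls res [] _ ?_]
      · simp [colChars, Nat.div_eq_of_lt hsmall]
      · intro k hk
        rw [PySem.Int.mod_eq_emod_of_pos hm,
            show (a:Int) * m + 1 + (k:Int) = (1 + (k:Int)) + m * a by ring,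
            Int.add_mul_emod_self_left, Int.emod_eq_of_lt (by omega) (by omega)]
        omega
    · rw [Nat.not_lt] at hsmall
      obtain ⟨t, d, hsplit, htl⟩ : ∃ t d, ls = t ++ d ∧ t.length = M :=
        ⟨ls.take M, ls.drop M, (List.take_append_drop M ls).symm, by simp; omega⟩
      subst hsplit
      have hlen' : d.length ≤ N := by
        rw [List.length_append, htl] at hlen; omega
      rw [PySem.List.enumerate_append, List.foldl_append]
      have htne : t ≠ [] := by intro h; rw [h] at htl; simp at htl; omega
      rw [runA_chunk m c t htne res [] _ ?_ ?_]
      · have hstart : ((a:Int) * m + 1) + t.length = ((a + 1 : Nat) : Int) * m + 1 := by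
          rw [htl]; push_cast; rw [hMm]; ring
        rw [hstart, ih d hlen' (a + 1)]
        have hq : (t ++ d).length / M = d.length / M + 1 := by
          have : (t ++ d).length = d.length + M := by rw [List.length_append, htl]; omega
          rw [this, Nat.add_div_right _ (by omega)]
        have hC : ((c - 1).toNat : Int) = c - 1 := by omega
        have hClt : (c - 1).toNat < M := by omega
        simp only [List.nil_append, colChars, hq, List.range_succ_eq_map, List.map_cons, List.map_map,
          List.append_assoc, List.singleton_append]
        refine congrArg (res ++ ·) (congrArg₂ List.cons ?_ ?_)
        · rw [PySem.List.pyGetD_eq_getElem t ' ' (by omega) (by omega)]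
          rw [List.getD_eq_getElem?_getD, List.getElem?_append_left (by omega),
              List.getElem?_eq_getElem (by omega)]
          simp only [Option.getD_some]
          congr 1
          omega
        · apply List.map_congr_left
          intro k hk
          simp only [Function.comp]
          have hsm : Nat.succ k * M = k * M + M := Nat.succ_mul k M
          rw [List.getD_eq_getElem?_getD, List.getD_eq_getElem?_getD,
              List.getElem?_append_right (by omega)]
          congr 2
          omega
      · intro k hk
        rw [htl] at hk
        rw [PySem.Int.mod_eq_emod_of_pos hm,
            show (a:Int) * m + 1 + (k:Int) = (1 + (k:Int)) + m * a by ring,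
            Int.add_mul_emod_self_left, Int.emod_eq_of_lt (by omega) (by omega)]
        omega
      · rw [PySem.Int.mod_eq_emod_of_pos hm, htl]
        have h1 : ((M - 1 : Nat) : Int) = m - 1 := by omega
        rw [h1]
        have h2 : (a:Int) * m + 1 + (m - 1) = (a + 1) * m := by ring
        rw [h2]
        exact Int.mul_emod_left _ _

-- a filterMap of in-range lookups is a map of getD
lemma filterMap_getElem?_range (ls : List Char) (g : Nat → Nat) :
    ∀ (n : Nat), (∀ k, k < n → g k < ls.length) →
    List.filterMap (fun k => ls[g k]?) (List.range n)
      = (List.range n).map (fun k => ls.getD (g k) ' ') := by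
  intro n
  induction n with
  | zero => intro _; simp
  | succ n ih =>
    intro h
    rw [List.range_succ, List.filterMap_append, List.map_append,
        ih (fun k hk => h k (by omega))]
    simp [List.getD_eq_getElem?_getD, List.getElem?_eq_getElem (h n (by omega))]

-- under Pre_, my_string[c-1::m] is the strided index map, one entry per started row
lemma slice?_pos_step (ls : List Char) (m c : Int) (hm : 0 < m) (hc1 : 1 ≤ c) (hc2 : c ≤ m)
    (hlen : m.toNat ≤ ls.length) :
    PySem.List.slice? ls (some (c - 1)) none m
      = some (List.filterMap (fun k => ls[((c - 1) + m * (k : Nat)).toNat]?)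
          (List.range ((((ls.length : Int) - (c - 1) + m - 1) / m).toNat))) := by
  rw [PySem.List.slice?, if_neg (by omega), PySem.List.sliceIndices]
  simp only [if_neg (by omega : ¬ m < 0)]
  have hstart : (if c - 1 < 0 then max (c - 1 + ls.length) 0 else min (c - 1) (ls.length : Int)) = c - 1 := by
    rw [if_neg (by omega)]
    exact min_eq_left (by omega)
  simp only [hstart, if_pos hm]
  rw [if_pos (by omega : c - 1 < (ls.length : Int))]

-- B computes colChars
lemma runB (my_string : String) (m c : Int) (hm : 0 < m)
    (hpre : (1 ≤ c ∧ c ≤ m) ∨ PySem.Str.len my_string < m) :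
    solution_alt my_string m c
      = String.ofList (colChars m.toNat (c - 1).toNat my_string.toList) := by
  unfold solution_alt
  set ls := my_string.toList with hls
  set M := m.toNat with hM
  have hMm : (M : Int) = m := by omega
  have hlen : PySem.Str.len my_string = (ls.length : Int) := PySem.Str.len_eq my_string
  rw [hlen, show PySem.Int.floordiv (ls.length : Int) m = ((ls.length / M : Nat) : Int) by
        rw [← hMm]; exact PySem.Int.floordiv_natCast _ _,
      PySem.List.slice_to_natCast]
  congr 1
  by_cases hq : ls.length / M = 0
  · simp [colChars, hq]
  · have hMlen : M ≤ ls.length := by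
      rcases Nat.lt_or_ge ls.length M with h | h
      · exact absurd (Nat.div_eq_of_lt h) hq
      · exact h
    obtain ⟨hc1, hc2⟩ : 1 ≤ c ∧ c ≤ m := by
      rcases hpre with h | h
      · exact h
      · rw [hlen] at h; omega
    rw [slice?_pos_step ls m c hm hc1 hc2 hMlen, Option.getD_some]
    set cnt := (((ls.length : Int) - (c - 1) + m - 1) / m).toNat with hcnt
    have hcnt' : (cnt : Int) = ((ls.length : Int) - (c - 1) + m - 1) / m :=
      Int.toNat_of_nonneg (Int.ediv_nonneg (by omega) (by omega))
    have hmulle : ((cnt : Int)) * m ≤ (ls.length : Int) - (c - 1) + m - 1 := by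
      rw [hcnt']
      exact Int.ediv_mul_le _ (by omega)
    have hrange : ∀ k, k < cnt → ((c - 1) + m * (k : Nat)).toNat < ls.length := by
      intro k hk
      have h1 : m * ((k : Int) + 1) ≤ m * cnt :=
        mul_le_mul_of_nonneg_left (by exact_mod_cast by omega) (by omega)
      have h2 : m * ((k : Int) + 1) = m * k + m := by ring
      have h3 : m * (cnt : Int) = cnt * m := by ring
      omega
    rw [filterMap_getElem?_range ls _ cnt hrange]
    have hqle : ls.length / M ≤ cnt := by
      have h1 : (ls.length / M) * M ≤ ls.length := Nat.div_mul_le_self _ _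
      have h1' : ((ls.length / M : Nat) : Int) * m ≤ (ls.length : Int) := by
        rw [← hMm]; exact_mod_cast h1
      have h2 : ((ls.length / M : Nat) : Int) ≤ ((ls.length : Int) - (c - 1) + m - 1) / m := by
        rw [Int.le_ediv_iff_mul_le hm]
        omega
      omega
    rw [← List.map_take, List.take_range, Nat.min_eq_left hqle]
    apply List.map_congr_left
    intro k hk
    have hcast : m * (k : Int) = ((k * M : Nat) : Int) := by rw [← hMm]; push_cast; ring
    congr 1
    omega

-- ===== VERDICT (by name: the statement is the Claim_ definition above) =====
theorem solution_spec : Claim_equal_solution := by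
  intro my_string m c _ hpre
  obtain ⟨hm1, hrest⟩ := hpre
  unfold Spec_solution
  rw [runB my_string m c (by omega) hrest]
  unfold solution
  have hlen := PySem.Str.len_eq my_string
  rcases hrest with hc | hshort
  · have h := runA_outer m c (by omega) hc.1 hc.2 my_string.toList.length
      my_string.toList le_rfl 0 []
    rw [show (((0:Nat):Int)) * m + 1 = 1 by simp] at h
    rw [h, List.nil_append]
  · rw [runA_no_complete m c my_string.toList [] [] 1 ?_]
    · have hsm : my_string.toList.length < m.toNat := by omega
      simp only [colChars, Nat.div_eq_of_lt hsm, List.range_zero, List.map_nil]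
    · intro k hk
      rw [PySem.Int.mod_eq_emod_of_pos (by omega : (0:Int) < m),
          Int.emod_eq_of_lt (by omega) (by omega)]
      omega
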